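-- pv_equiv track=rewrite | github.com/Zach-schwark/Honours-Research | Cross_Validation/BIC_cross_validation.py | variable_step_loop
-- ===== SOURCE A (Python) =====
-- def variable_step_loop(start, end):
--     current = start
--     while current < end:
--         yield current
--
--         if current < 1000:
--             step = 100
--         elif current < 10000:
--             step = 1000
--         else:
--             step = 10000
--
--         current = min(current + step, end)
-- ===== SOURCE B (Python) =====
-- def _phase(c, bound, step):
--     # closed form: number of yields in this regime is ceil((bound - c) / step), clamped at 0
--     n = max(0, -((c - bound) // step))
--     return [c + i * step for i in range(n)], c + n * step
--
--
-- def variable_step_loop(start, end):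
--     vals1, c = _phase(start, min(1000, end), 100)
--     vals2, c = _phase(c, min(10000, end), 1000)
--     vals3, c = _phase(c, end, 10000)
--     yield from vals1 + vals2 + vals3
-- ===== Notes on version B (the rewrite author's own statement) =====
-- stated objective: alternative
-- what changed: Replaced A's step-by-step simulation loop (per-iteration magnitude branch and min-clamp) with a closed-form computation: for each of the three step regimes one ceiling division gives the number of yielded values, which are then emitted directly as c + i*step over range(n).
import Mathlib
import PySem

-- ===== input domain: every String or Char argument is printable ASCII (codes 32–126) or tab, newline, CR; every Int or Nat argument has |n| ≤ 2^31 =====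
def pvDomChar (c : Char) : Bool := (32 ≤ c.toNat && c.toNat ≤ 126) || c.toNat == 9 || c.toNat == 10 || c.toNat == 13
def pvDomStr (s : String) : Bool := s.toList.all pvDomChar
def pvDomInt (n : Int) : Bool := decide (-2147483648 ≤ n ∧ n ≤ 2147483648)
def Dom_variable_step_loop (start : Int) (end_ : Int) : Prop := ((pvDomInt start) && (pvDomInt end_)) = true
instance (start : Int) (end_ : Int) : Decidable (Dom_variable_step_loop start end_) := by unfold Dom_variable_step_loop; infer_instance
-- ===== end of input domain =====

-- B replaces A's step-by-step simulation with closed-form counts: per regime, one ceiling division gives the number of yields and the values are emitted as c + i*step.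


-- ===== PORT A =====
-- A's single while loop: yield current, pick the step by current's magnitude, clamp to end_.
-- fuel is a pure totality guard: each iteration raises current by at least 1 while current < end_,
-- so fuel = (end_ - start).toNat never runs out before the while condition fails.
def pvLoopA (fuel : Nat) (end_ cur : Int) : List Int :=
  match fuel with
  | 0 => []
  | f + 1 =>
    if cur < end_ then
      cur :: pvLoopA f end_ (min (cur + (if cur < 1000 then 100 else if cur < 10000 then 1000 else 10000)) end_)
    else []

def variable_step_loop (start : Int) (end_ : Int) : List Int :=
  pvLoopA (end_ - start).toNat end_ start

-- ===== PORT B =====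
-- Source B's _phase: n = max(0, -((c - bound) // step)); ([c + i*step for i in range(n)], c + n*step)
def pvPhase (c bound step : Int) : List Int × Int :=
  let n := max 0 (-(PySem.Int.floordiv (c - bound) step))
  ((PySem.List.pyRange 0 n 1).map (fun i => c + i * step), c + n * step)

def variable_step_loop_alt (start : Int) (end_ : Int) : List Int :=
  let p1 := pvPhase start (min 1000 end_) 100
  let p2 := pvPhase p1.2 (min 10000 end_) 1000
  let p3 := pvPhase p2.2 end_ 10000
  p1.1 ++ p2.1 ++ p3.1

-- ===== PRECONDITION & SPEC =====
def Spec_variable_step_loop (start : Int) (end_ : Int) (out : List Int) : Prop := out = variable_step_loop_alt start end_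
instance (start : Int) (end_ : Int) (out : List Int) : Decidable (Spec_variable_step_loop start end_ out) := by unfold Spec_variable_step_loop; infer_instance

-- ===== CLAIM (what is proved, stated in full; the proofs are below) =====
def Claim_equal_variable_step_loop : Prop := ∀ (start : Int) (end_ : Int), Dom_variable_step_loop start end_ → Spec_variable_step_loop start end_ (variable_step_loop start end_)

-- ===== LEMMAS AND PROOFS =====

theorem pvLoopA_nil (f : Nat) (end_ cur : Int) (h : ¬ cur < end_) : pvLoopA f end_ cur = [] := by
  cases f <;> simp [pvLoopA, h]

-- empty regime: when bound ≤ c the closed form yields nothing and leaves c unchanged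
theorem pvPhase_nil (c bound step : Int) (hs : 0 < step) (h : bound ≤ c) :
    pvPhase c bound step = ([], c) := by
  have h0 : (0 : Int) ≤ PySem.Int.floordiv (c - bound) step :=
    (PySem.Int.le_floordiv_iff_mul_le hs).mpr (by omega)
  have hn : max 0 (-(PySem.Int.floordiv (c - bound) step)) = 0 := by omega
  simp [pvPhase, hn, PySem.List.pyRange_one_eq_nil (le_refl (0:Int))]

-- non-empty regime: the closed form peels off c and continues from c + step
theorem pvPhase_cons (c bound step : Int) (hs : 0 < step) (h : c < bound) :
    pvPhase c bound step =
      (c :: (pvPhase (c + step) bound step).1, (pvPhase (c + step) bound step).2) := by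
  set q : Int := -(PySem.Int.floordiv (-(bound - c)) step) with hq
  have hbr : (q - 1) * step < bound - c ∧ bound - c ≤ q * step :=
    (PySem.Int.neg_floordiv_neg_eq_iff_of_pos hs).mp rfl
  have hq1 : 1 ≤ q := by nlinarith [hbr.2]
  have hq' : -(PySem.Int.floordiv ((c + step) - bound) step) = q - 1 := by
    have : -(PySem.Int.floordiv (-(bound - (c + step))) step) = q - 1 :=
      (PySem.Int.neg_floordiv_neg_eq_iff_of_pos hs).mpr (by constructor <;> nlinarith [hbr.1, hbr.2])
    simpa [show -(bound - (c + step)) = (c + step) - bound by ring] using this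
  have hc : -(PySem.Int.floordiv (c - bound) step) = q := by
    simpa [show -(bound - c) = c - bound by ring] using hq.symm
  simp only [pvPhase, hq', hc]
  have hm : max 0 q = max 0 (q - 1) + 1 := by omega
  have hm' : (max 0 (q - 1)) = q - 1 := by omega
  rw [hm, hm']
  simp only [Prod.mk.injEq]
  constructor
  · rw [PySem.List.pyRange_one, PySem.List.pyRange_one]
    have ht : ((q - 1) + 1 - 0).toNat = (q - 1 - 0).toNat + 1 := by omega
    rw [ht, List.range_succ_eq_map]
    simp only [List.map_cons, List.map_map]
    congr 1
    · push_cast; ring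
    · apply List.map_congr_left
      intro k _
      simp only [Function.comp]
      push_cast
      ring
  · ring
-- all three regimes are empty once end_ ≤ c
theorem alt_nil (c end_ : Int) (h : end_ ≤ c) : variable_step_loop_alt c end_ = [] := by
  simp only [variable_step_loop_alt]
  rw [pvPhase_nil c (min 1000 end_) 100 (by omega) (by omega)]
  rw [pvPhase_nil c (min 10000 end_) 1000 (by omega) (by omega)]
  rw [pvPhase_nil c end_ 10000 (by omega) h]
  simp

-- one A-iteration equals peeling one element off B's closed form
theorem alt_cons (c end_ : Int) (h : c < end_) :
    variable_step_loop_alt c end_ =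
      c :: variable_step_loop_alt
        (c + (if c < 1000 then 100 else if c < 10000 then 1000 else 10000)) end_ := by
  by_cases h1 : c < 1000
  · simp only [variable_step_loop_alt, if_pos h1]
    rw [pvPhase_cons c (min 1000 end_) 100 (by omega) (by omega)]
    simp
  · by_cases h2 : c < 10000
    · simp only [variable_step_loop_alt, if_neg h1, if_pos h2]
      rw [pvPhase_nil c (min 1000 end_) 100 (by omega) (by omega),
          pvPhase_nil (c + 1000) (min 1000 end_) 100 (by omega) (by omega),
          pvPhase_cons c (min 10000 end_) 1000 (by omega) (by omega)]
      simp
    · simp only [variable_step_loop_alt, if_neg h1, if_neg h2]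
      rw [pvPhase_nil c (min 1000 end_) 100 (by omega) (by omega),
          pvPhase_nil (c + 10000) (min 1000 end_) 100 (by omega) (by omega),
          pvPhase_nil c (min 10000 end_) 1000 (by omega) (by omega),
          pvPhase_nil (c + 10000) (min 10000 end_) 1000 (by omega) (by omega),
          pvPhase_cons c end_ 10000 (by omega) h]
      simp

theorem chain_eq (end_ : Int) : ∀ (n : Nat) (cur : Int) (fA : Nat),
    (end_ - cur).toNat ≤ n → (end_ - cur).toNat ≤ fA →
    pvLoopA fA end_ cur = variable_step_loop_alt cur end_ := by
  intro n
  induction n with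
  | zero =>
    intro cur fA hn _
    rw [pvLoopA_nil fA end_ cur (by omega), alt_nil cur end_ (by omega)]
  | succ n ih =>
    intro cur fA hn hfA
    by_cases hend : cur < end_
    · cases fA with
      | zero => omega
      | succ gA =>
        rw [alt_cons cur end_ hend]
        simp only [pvLoopA, if_pos hend]
        set step : Int := if cur < 1000 then 100 else if cur < 10000 then 1000 else 10000 with hstep
        have hs : (1 : Int) ≤ step := by rw [hstep]; split_ifs <;> omega
        by_cases hlt : cur + step < end_
        · have hmin : min (cur + step) end_ = cur + step := by omega
          rw [hmin]
          exact congrArg (cur :: ·) (ih (cur + step) gA (by omega) (by omega))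
        · have hmin : min (cur + step) end_ = end_ := by omega
          rw [hmin, pvLoopA_nil gA end_ end_ (by omega), alt_nil (cur + step) end_ (by omega)]
    · rw [pvLoopA_nil fA end_ cur hend, alt_nil cur end_ (by omega)]

-- ===== VERDICT (by name: the statement is the Claim_ definition above) =====
theorem variable_step_loop_spec : Claim_equal_variable_step_loop := by
  intro start end_ _
  show variable_step_loop start end_ = variable_step_loop_alt start end_
  exact chain_eq end_ (end_ - start).toNat start _ le_rfl le_rfl
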